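-- pv_equiv track=rewrite | github.com/kevoshea/AST-GCN | evaluator.py | identify_events
-- ===== SOURCE A (Python) =====
-- def identify_events(series):
--     """
--     Identifies anomalous events in a binary series and returns the start and end indices for each event.
--     """
--     events = []
--     in_event = False
--     for i, value in enumerate(series):
--         if value == 1 and not in_event:
--             start = i
--             in_event = True
--         elif value == 0 and in_event:
--             end = i
--             events.append((start, end))
--             in_event = False
--     # Handle case where the last event goes until the end of the series
--     if in_event:
--         events.append((start, len(series)))
--     return events
-- ===== SOURCE B (Python) =====
-- def identify_events(series):
--     """
--     Identifies anomalous events in a binary series and returns the start and end indices for each event.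
--     Two-phase decomposition: keep only binary entries, compress them into run-start
--     groups, then pair each 1-group's start with the next group's start (or len(series)).
--     """
--     n = len(series)
--     pairs = [(i, v) for i, v in enumerate(series) if v == 0 or v == 1]
--     groups = []  # (value, index of the run's first element)
--     for i, v in pairs:
--         if not groups or groups[-1][0] != v:
--             groups.append((v, i))
--     nexts = [first for _, first in groups[1:]] + [n]
--     return [(first, end) for (v, first), end in zip(groups, nexts) if v == 1]
-- ===== Notes on version B (the rewrite author's own statement) =====
-- stated objective: alternative
-- what changed: Replaces A's single scan with a running in_event state flag by a two-phase decomposition: filter to binary entries, compress them into run-start groups, then zip each group with the next group's start index (or len(series)) and keep the 1-groups.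
import Mathlib
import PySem

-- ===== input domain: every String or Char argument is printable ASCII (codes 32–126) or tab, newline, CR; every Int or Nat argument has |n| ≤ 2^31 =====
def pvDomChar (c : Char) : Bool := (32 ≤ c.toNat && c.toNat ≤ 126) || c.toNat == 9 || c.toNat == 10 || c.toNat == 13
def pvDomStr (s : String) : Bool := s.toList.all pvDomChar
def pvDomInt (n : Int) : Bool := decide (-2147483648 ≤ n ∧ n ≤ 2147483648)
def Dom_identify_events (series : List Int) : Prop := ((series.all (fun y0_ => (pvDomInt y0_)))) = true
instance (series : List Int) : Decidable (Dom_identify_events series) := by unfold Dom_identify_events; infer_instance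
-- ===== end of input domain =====

-- B replaces A's running in_event state flag by a two-phase decomposition (filter to
-- binary entries, compress into run-start groups, zip with next-group starts); same cost.

-- ===== PORT A =====
-- state = (events, in_event, start); Python's unset `start` is represented by the unused initial 0
def identify_events (series : List Int) : List (Int × Int) :=
  let st :=
    (PySem.List.enumerate series).foldl
      (fun (st : List (Int × Int) × Bool × Int) (p : Int × Int) =>
        let events := st.1
        let in_event := st.2.1
        let start := st.2.2
        if p.2 = 1 ∧ in_event = false then (events, true, p.1)
        else if p.2 = 0 ∧ in_event = true then (events ++ [(start, p.1)], false, start)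
        else (events, in_event, start))
      ([], false, 0)
  if st.2.1 = true then st.1 ++ [(st.2.2, (series.length : Int))] else st.1

-- ===== PORT B =====
def identify_events_alt (series : List Int) : List (Int × Int) :=
  let n : Int := series.length
  let pairs : List (Int × Int) :=
    (PySem.List.enumerate series).filterMap
      (fun p => if p.2 = 0 ∨ p.2 = 1 then some p else none)
  let groups : List (Int × Int) :=
    pairs.foldl
      (fun gs p =>
        if gs = [] ∨ ((gs.getLast?.getD (0, 0)).1 ≠ p.2) then gs ++ [(p.2, p.1)] else gs)
      []
  let nexts : List Int := (groups.drop 1).map (fun g => g.2) ++ [n]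
  (groups.zip nexts).filterMap (fun ge => if ge.1.1 = 1 then some (ge.1.2, ge.2) else none)

-- ===== PRECONDITION & SPEC =====
def Spec_identify_events (series : List Int) (out : List (Int × Int)) : Prop := out = identify_events_alt series
instance (series : List Int) (out : List (Int × Int)) : Decidable (Spec_identify_events series out) := by unfold Spec_identify_events; infer_instance

-- ===== CLAIM (what is proved, stated in full; the proofs are below) =====
def Claim_equal_identify_events : Prop := ∀ (series : List Int), Dom_identify_events series → Spec_identify_events series (identify_events series)

-- ===== LEMMAS AND PROOFS =====

-- canonical recursion: 1-runs of the binary pairs list (state = pending run start)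
def pvRuns (o : Option Int) (l : List (Int × Int)) (n : Int) : List (Int × Int) :=
  match o, l with
  | none, [] => []
  | some s, [] => [(s, n)]
  | none, (i, v) :: rest => if v = 1 then pvRuns (some i) rest n else pvRuns none rest n
  | some s, (i, v) :: rest => if v = 0 then (s, i) :: pvRuns none rest n else pvRuns (some s) rest n

-- canonical grouping (state = value of the current run, if any)
def pvGrp (last : Option Int) (l : List (Int × Int)) : List (Int × Int) :=
  match l with
  | [] => []
  | (i, v) :: rest => if last = some v then pvGrp last rest else (v, i) :: pvGrp (some v) rest

def pvStepA (st : List (Int × Int) × Bool × Int) (p : Int × Int) : List (Int × Int) × Bool × Int :=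
  if p.2 = 1 ∧ st.2.1 = false then (st.1, true, p.1)
  else if p.2 = 0 ∧ st.2.1 = true then (st.1 ++ [(st.2.2, p.1)], false, st.2.2)
  else (st.1, st.2.1, st.2.2)

def pvFilt (l : List (Int × Int)) : List (Int × Int) :=
  l.filterMap (fun p => if p.2 = 0 ∨ p.2 = 1 then some p else none)

def pvFinish (st : List (Int × Int) × Bool × Int) (n : Int) : List (Int × Int) :=
  if st.2.1 = true then st.1 ++ [(st.2.2, n)] else st.1

def pvEmit (G : List (Int × Int)) (n : Int) : List (Int × Int) :=
  (G.zip ((G.drop 1).map (fun g => g.2) ++ [n])).filterMap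
    (fun ge => if ge.1.1 = 1 then some (ge.1.2, ge.2) else none)

lemma pvEmit_cons (g : Int × Int) (G : List (Int × Int)) (n : Int) :
    pvEmit (g :: G) n =
      (if g.1 = 1 then [(g.2, (G.headD (0, n)).2)] else []) ++ pvEmit G n := by
  cases G with
  | nil => by_cases h : g.1 = 1 <;> simp [pvEmit, h]
  | cons h t => by_cases hg : g.1 = 1 <;> simp [pvEmit, hg]

-- A's fold over any enumerated list, finished, is pvRuns of its binary filtrate
lemma pvA_fold (l : List (Int × Int)) (n : Int) :
    ∀ (events : List (Int × Int)) (b : Bool) (s : Int),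
      pvFinish (l.foldl pvStepA (events, b, s)) n =
        events ++ pvRuns (if b then some s else none) (pvFilt l) n := by
  induction l with
  | nil => intro events b s; cases b <;> simp [pvFinish, pvFilt, pvRuns]
  | cons p rest ih =>
    intro events b s
    obtain ⟨i, v⟩ := p
    rw [List.foldl_cons]
    by_cases h1 : v = 1
    · subst h1
      cases b with
      | false =>
        rw [show pvStepA (events, false, s) (i, 1) = (events, true, i) from by simp [pvStepA]]
        rw [ih events true i]
        simp [pvFilt, pvRuns]
      | true =>
        rw [show pvStepA (events, true, s) (i, 1) = (events, true, s) from by simp [pvStepA]]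
        rw [ih events true s]
        simp [pvFilt, pvRuns]
    · by_cases h0 : v = 0
      · subst h0
        cases b with
        | false =>
          rw [show pvStepA (events, false, s) (i, 0) = (events, false, s) from by simp [pvStepA]]
          rw [ih events false s]
          simp [pvFilt, pvRuns]
        | true =>
          rw [show pvStepA (events, true, s) (i, 0) = (events ++ [(s, i)], false, s) from by
            simp [pvStepA]]
          rw [ih (events ++ [(s, i)]) false s]
          simp [pvFilt, pvRuns]
      · cases b with
        | false =>
          rw [show pvStepA (events, false, s) (i, v) = (events, false, s) from by
            simp [pvStepA, h1, h0]]
          rw [ih events false s]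
          simp [pvFilt, h0, h1]
        | true =>
          rw [show pvStepA (events, true, s) (i, v) = (events, true, s) from by
            simp [pvStepA, h1, h0]]
          rw [ih events true s]
          simp [pvFilt, h0, h1]

-- B's group fold is the canonical grouping
lemma pvB_groups (l : List (Int × Int)) :
    ∀ gs : List (Int × Int),
      l.foldl (fun gs p =>
          if gs = [] ∨ ((gs.getLast?.getD (0, 0)).1 ≠ p.2) then gs ++ [(p.2, p.1)] else gs) gs
        = gs ++ pvGrp (gs.getLast?.map Prod.fst) l := by
  induction l with
  | nil => intro gs; simp [pvGrp]
  | cons p rest ih =>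
    intro gs
    obtain ⟨i, v⟩ := p
    rw [List.foldl_cons]
    cases gs with
    | nil =>
      rw [if_pos (by simp)]
      rw [ih ([] ++ [(v, i)])]
      simp [pvGrp]
    | cons g0 gt =>
      by_cases h : (((g0 :: gt).getLast?.getD (0, 0)).1 ≠ v)
      · rw [if_pos (Or.inr h)]
        rw [ih ((g0 :: gt) ++ [(v, i)])]
        have hlast : ((g0 :: gt) ++ [(v, i)]).getLast? = some (v, i) := by
          rw [List.getLast?_concat]
        rw [hlast]
        have hne : ¬ ((g0 :: gt).getLast?.map Prod.fst) = some v := by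
          rcases hl : (g0 :: gt).getLast? with _ | ⟨a⟩
          · simp at hl
          · rw [hl] at h; simp only [Option.getD_some] at h
            simp [h]
        have hg : pvGrp ((g0 :: gt).getLast?.map Prod.fst) ((i, v) :: rest)
            = (v, i) :: pvGrp (some v) rest := by
          simp only [pvGrp]; rw [if_neg hne]
        rw [hg]
        simp [List.append_assoc]
      · simp only [ne_eq, not_not] at h
        rw [if_neg (by simp [h])]
        rw [ih (g0 :: gt)]
        have hsome : ((g0 :: gt).getLast?.map Prod.fst) = some v := by
          rcases hl : (g0 :: gt).getLast? with _ | ⟨a⟩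
          · simp at hl
          · rw [hl] at h; simp only [Option.getD_some] at h
            simp [h]
        have hg : pvGrp ((g0 :: gt).getLast?.map Prod.fst) ((i, v) :: rest)
            = pvGrp (some v) rest := by
          simp only [pvGrp]; rw [if_pos hsome, hsome]
        rw [hg, hsome]

-- emission ignores a leading 0-group
lemma pvEmit_zero (f : Int) (G : List (Int × Int)) (n : Int) :
    pvEmit ((0, f) :: G) n = pvEmit G n := by
  rw [pvEmit_cons]; simp

-- after a 0, grouping state does not matter for emission
lemma pvGrp_zero (l : List (Int × Int)) (n : Int)
    (hbin : ∀ p ∈ l, p.2 = 0 ∨ p.2 = 1) :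
    pvEmit (pvGrp (some 0) l) n = pvEmit (pvGrp none l) n := by
  induction l with
  | nil => rfl
  | cons p rest ih =>
    obtain ⟨i, v⟩ := p
    have hrest : ∀ p ∈ rest, p.2 = 0 ∨ p.2 = 1 := fun p hp => hbin p (List.mem_cons_of_mem _ hp)
    rcases hbin (i, v) (by simp) with h0 | h1
    · subst h0
      have l1 : pvGrp (some 0) ((i, (0 : Int)) :: rest) = pvGrp (some 0) rest := by simp [pvGrp]
      have l2 : pvGrp none ((i, (0 : Int)) :: rest) = (0, i) :: pvGrp (some 0) rest := by
        simp [pvGrp]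
      rw [l1, l2, pvEmit_zero]
    · subst h1
      simp [pvGrp]

-- the crux: pvRuns equals emission of the canonical grouping (binary input)
lemma pvRuns_emit (l : List (Int × Int)) (n : Int)
    (hbin : ∀ p ∈ l, p.2 = 0 ∨ p.2 = 1) :
    pvRuns none l n = pvEmit (pvGrp none l) n ∧
      ∀ s : Int, pvRuns (some s) l n = pvEmit ((1, s) :: pvGrp (some 1) l) n := by
  induction l with
  | nil =>
    constructor
    · rfl
    · intro s; simp [pvRuns, pvGrp, pvEmit]
  | cons p rest ih =>
    obtain ⟨i, v⟩ := p
    have hrest : ∀ p ∈ rest, p.2 = 0 ∨ p.2 = 1 := fun p hp => hbin p (List.mem_cons_of_mem _ hp)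
    obtain ⟨ihn, ihs⟩ := ih hrest
    constructor
    · rcases hbin (i, v) (by simp) with h0 | h1
      · subst h0
        have hr : pvRuns none ((i, (0 : Int)) :: rest) n = pvRuns none rest n := by simp [pvRuns]
        have hg : pvGrp none ((i, (0 : Int)) :: rest) = (0, i) :: pvGrp (some 0) rest := by
          simp [pvGrp]
        rw [hr, hg, pvEmit_zero, pvGrp_zero rest n hrest]
        exact ihn
      · subst h1
        have hr : pvRuns none ((i, (1 : Int)) :: rest) n = pvRuns (some i) rest n := by
          simp [pvRuns]
        have hg : pvGrp none ((i, (1 : Int)) :: rest) = (1, i) :: pvGrp (some 1) rest := by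
          simp [pvGrp]
        rw [hr, hg]
        exact ihs i
    · intro s
      rcases hbin (i, v) (by simp) with h0 | h1
      · subst h0
        have hr : pvRuns (some s) ((i, (0 : Int)) :: rest) n = (s, i) :: pvRuns none rest n := by
          simp [pvRuns]
        have hg : pvGrp (some 1) ((i, (0 : Int)) :: rest) = (0, i) :: pvGrp (some 0) rest := by
          simp [pvGrp]
        rw [hr, hg, pvEmit_cons]
        simp only [List.headD_cons]
        rw [pvEmit_zero, pvGrp_zero rest n hrest, ihn]
        simp
      · subst h1
        have hr : pvRuns (some s) ((i, (1 : Int)) :: rest) n = pvRuns (some s) rest n := by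
          simp [pvRuns]
        have hg : pvGrp (some 1) ((i, (1 : Int)) :: rest) = pvGrp (some 1) rest := by
          simp [pvGrp]
        rw [hr, hg]
        exact ihs s

lemma pvFilt_binary (l : List (Int × Int)) :
    ∀ p ∈ pvFilt l, p.2 = 0 ∨ p.2 = 1 := by
  intro p hp
  simp only [pvFilt, List.mem_filterMap] at hp
  obtain ⟨q, _, hq⟩ := hp
  by_cases h : q.2 = 0 ∨ q.2 = 1
  · rw [if_pos h] at hq; cases hq; exact h
  · rw [if_neg h] at hq; cases hq

-- ===== VERDICT (by name: the statement is the Claim_ definition above) =====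
theorem identify_events_spec : Claim_equal_identify_events := by
  intro series _
  unfold Spec_identify_events
  have hA' : identify_events series
      = pvFinish ((PySem.List.enumerate series).foldl pvStepA ([], false, 0))
          (series.length : Int) := rfl
  have hB' : identify_events_alt series
      = pvEmit ((pvFilt (PySem.List.enumerate series)).foldl
          (fun gs p =>
            if gs = [] ∨ ((gs.getLast?.getD (0, 0)).1 ≠ p.2) then gs ++ [(p.2, p.1)] else gs) [])
          (series.length : Int) := rfl
  rw [hA', hB', pvA_fold, pvB_groups]
  simpa using
    (pvRuns_emit (pvFilt (PySem.List.enumerate series)) (series.length : Int)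
      (pvFilt_binary _)).1
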